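-- pv_equiv track=rewrite | github.com/LACCEI/video-preparer | prototypes/resizing.py | get_largest_dimension
-- ===== SOURCE A (Python) =====
-- def get_largest_dimension(list_of_sizes: list[list[int, int]]) -> list[int, int]:
--   max_width = 0
--   max_height = 0
--
--   for size in list_of_sizes:
--     if size[0] > max_width:
--       max_width = size[0]
--     if size[1] > max_height:
--       max_height = size[1]
--
--   return [max_width, max_height]
-- ===== SOURCE B (Python) =====
-- def get_largest_dimension(list_of_sizes: list[list[int, int]]) -> list[int, int]:
--   max_width = max([0, *(s[0] for s in list_of_sizes)])
--   max_height = max([0, *(s[1] for s in list_of_sizes)])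
--   return [max_width, max_height]
-- ===== Notes on version B (the rewrite author's own statement) =====
-- stated objective: idiomatic
-- what changed: Replaces A's single interleaved loop with mutable running maxima by two independent builtin max reductions, one per column, each seeded with the 0 floor.
import Mathlib
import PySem

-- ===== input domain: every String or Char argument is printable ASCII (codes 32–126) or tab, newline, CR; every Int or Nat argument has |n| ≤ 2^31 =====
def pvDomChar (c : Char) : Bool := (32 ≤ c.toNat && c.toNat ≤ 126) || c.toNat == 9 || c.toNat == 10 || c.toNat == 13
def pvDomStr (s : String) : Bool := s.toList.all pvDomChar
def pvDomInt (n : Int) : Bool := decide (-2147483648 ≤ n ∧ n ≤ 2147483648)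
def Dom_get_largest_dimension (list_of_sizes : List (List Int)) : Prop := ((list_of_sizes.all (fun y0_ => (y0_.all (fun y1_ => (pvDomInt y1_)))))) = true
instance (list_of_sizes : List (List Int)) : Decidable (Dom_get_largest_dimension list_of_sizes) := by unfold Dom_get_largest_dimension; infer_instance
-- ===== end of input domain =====

-- B replaces A's single interleaved max-tracking loop with two independent per-column max reductions (idiomatic, same cost).
-- ===== PORT A =====
def get_largest_dimension (list_of_sizes : List (List Int)) : List Int :=
  let st := list_of_sizes.foldl (fun (p : Int × Int) size =>
    let w := (PySem.List.pyGet? size 0).getD 0   -- size[0]; none (IndexError) excluded by Pre_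
    let h := (PySem.List.pyGet? size 1).getD 0   -- size[1]
    (if w > p.1 then w else p.1, if h > p.2 then h else p.2)) (0, 0)
  [st.1, st.2]

-- ===== PORT B =====
def get_largest_dimension_alt (list_of_sizes : List (List Int)) : List Int :=
  let max_width := (0 :: list_of_sizes.map (fun s => (PySem.List.pyGet? s 0).getD 0)).foldl max 0
  let max_height := (0 :: list_of_sizes.map (fun s => (PySem.List.pyGet? s 1).getD 0)).foldl max 0
  [max_width, max_height]

-- ===== PRECONDITION & SPEC =====
-- Pre_ excludes exactly the inputs where A raises IndexError: an inner list with fewer than 2 elements.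
def Pre_get_largest_dimension (list_of_sizes : List (List Int)) : Prop :=
  ∀ s ∈ list_of_sizes, 2 ≤ s.length
instance (list_of_sizes : List (List Int)) : Decidable (Pre_get_largest_dimension list_of_sizes) := by unfold Pre_get_largest_dimension; infer_instance
def pvWitness_get_largest_dimension : List (List Int) := [[3, 4], [5, 2]]
def Spec_get_largest_dimension (list_of_sizes : List (List Int)) (out : List Int) : Prop := out = get_largest_dimension_alt list_of_sizes
instance (list_of_sizes : List (List Int)) (out : List Int) : Decidable (Spec_get_largest_dimension list_of_sizes out) := by unfold Spec_get_largest_dimension; infer_instance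

-- ===== CLAIM (what is proved, stated in full; the proofs are below) =====
def Claim_equal_get_largest_dimension : Prop := ∀ (list_of_sizes : List (List Int)), Dom_get_largest_dimension list_of_sizes → Pre_get_largest_dimension list_of_sizes → Spec_get_largest_dimension list_of_sizes (get_largest_dimension list_of_sizes)

-- ===== LEMMAS AND PROOFS =====
theorem pv_foldl_pair (l : List (List Int)) (a b : Int) :
    l.foldl (fun (p : Int × Int) size =>
      let w := (PySem.List.pyGet? size 0).getD 0
      let h := (PySem.List.pyGet? size 1).getD 0
      (if w > p.1 then w else p.1, if h > p.2 then h else p.2)) (a, b)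
    = ((l.map (fun s => (PySem.List.pyGet? s 0).getD 0)).foldl max a,
       (l.map (fun s => (PySem.List.pyGet? s 1).getD 0)).foldl max b) := by
  induction l generalizing a b with
  | nil => simp
  | cons s t ih =>
    have hmax : ∀ (x y : Int), (if y > x then y else x) = max x y := by
      intro x y; split_ifs <;> omega
    simp only [List.foldl_cons, List.map_cons]
    rw [ih, hmax, hmax]

-- ===== VERDICT (by name: the statement is the Claim_ definition above) =====
theorem get_largest_dimension_spec : Claim_equal_get_largest_dimension := by
  intro l _ _
  unfold Spec_get_largest_dimension get_largest_dimension get_largest_dimension_alt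
  simp only [pv_foldl_pair, List.foldl_cons]
  norm_num
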